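-- pv_equiv track=rewrite | github.com/MingkaiMa/Principles-of-Programming-Python- | Lab/Lab_2/trailing_0s.py | third_computation
-- ===== SOURCE A (Python) =====
-- def third_computation(x):
--     t = 0
--     e = 1
--     while True:
--         if x//(5**e) != 0:
--             t += x//(5**e)
--             e += 1
--         else:
--             break
--     return t
-- ===== SOURCE B (Python) =====
-- def third_computation(x):
--     # Legendre's formula: sum_{e>=1} x // 5**e == (x - digitsum_base5(x)) // 4
--     s = 0
--     y = x
--     while y:
--         s += y % 5
--         y //= 5
--     return (x - s) // 4
-- ===== Notes on version B (the rewrite author's own statement) =====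
-- stated objective: alternative
-- what changed: B applies Legendre's closed-form formula (x - digit_sum_base5(x)) // 4 instead of summing the quotients x // 5**e: the loop computes base-5 digit sums, not quotient sums, and the result comes from one final subtraction and division.
import Mathlib
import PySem

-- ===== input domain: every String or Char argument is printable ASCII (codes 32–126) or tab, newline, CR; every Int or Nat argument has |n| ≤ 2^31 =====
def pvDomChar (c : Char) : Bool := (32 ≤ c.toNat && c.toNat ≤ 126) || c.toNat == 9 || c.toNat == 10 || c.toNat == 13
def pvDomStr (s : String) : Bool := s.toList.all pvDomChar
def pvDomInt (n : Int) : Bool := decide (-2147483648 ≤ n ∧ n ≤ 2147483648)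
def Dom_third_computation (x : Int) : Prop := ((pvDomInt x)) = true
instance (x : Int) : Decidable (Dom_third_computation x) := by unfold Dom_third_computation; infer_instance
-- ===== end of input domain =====

-- B replaces A's quotient-summing loop by Legendre's closed-form (x - base-5 digit sum) // 4 (alternative algorithm; same cost class).


-- ===== PORT A =====
-- A's while-loop over the exponent e; the '0 < x' conjunct is a totality guard only:
-- for x < 0 the Python loop never terminates (x//5**e stays negative), and such x are outside Pre_.
def third_computation_goA (x : Int) (e : Nat) (t : Int) : Int :=
  if h : 0 < x ∧ PySem.Int.floordiv x (5 ^ e) ≠ 0 then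
    third_computation_goA x (e + 1) (t + PySem.Int.floordiv x (5 ^ e))
  else t
termination_by x.toNat / 5 ^ e
decreasing_by
  obtain ⟨hx, h2⟩ := h
  have hpow : (0:Int) < 5 ^ e := by positivity
  have h1 : 1 ≤ x.toNat / 5 ^ e := by
    rcases Nat.lt_or_ge x.toNat (5 ^ e) with hlt | hge
    · exfalso
      apply h2
      rw [PySem.Int.floordiv_eq_ediv_of_pos hpow]
      apply Int.ediv_eq_zero_of_lt hx.le
      have hcast : (x.toNat : Int) < ((5 ^ e : Nat) : Int) := by exact_mod_cast hlt
      rw [Int.toNat_of_nonneg hx.le] at hcast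
      push_cast at hcast
      exact hcast
    · exact (Nat.one_le_div_iff (by positivity)).mpr hge
  rw [pow_succ, ← Nat.div_div_eq_div_mul]
  exact Nat.div_lt_self (by omega) (by norm_num)

def third_computation (x : Int) : Int := third_computation_goA x 1 0

-- ===== PORT B =====
-- B's digit-sum loop 'while y: s += y % 5; y //= 5'; '0 < y' likewise only guards the divergent negative case.
def third_computation_goS (y : Int) (s : Int) : Int :=
  if h : 0 < y then
    third_computation_goS (PySem.Int.floordiv y 5) (s + PySem.Int.mod y 5)
  else s
termination_by y.toNat
decreasing_by
  rw [PySem.Int.floordiv_eq_ediv_of_pos (by norm_num : (0:Int) < 5)]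
  omega

def third_computation_alt (x : Int) : Int :=
  PySem.Int.floordiv (x - third_computation_goS x 0) 4

-- ===== PRECONDITION & SPEC =====
-- Pre_ excludes negative x, on which the Python A (and B) loops forever and returns nothing.
def Pre_third_computation (x : Int) : Prop := 0 ≤ x
instance (x : Int) : Decidable (Pre_third_computation x) := by unfold Pre_third_computation; infer_instance
def pvWitness_third_computation : Int := (30)
def Spec_third_computation (x : Int) (out : Int) : Prop := out = third_computation_alt x
instance (x : Int) (out : Int) : Decidable (Spec_third_computation x out) := by unfold Spec_third_computation; infer_instance

-- ===== CLAIM (what is proved, stated in full; the proofs are below) =====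
def Claim_equal_third_computation : Prop := ∀ (x : Int), Dom_third_computation x → Pre_third_computation x → Spec_third_computation x (third_computation x)

-- ===== LEMMAS AND PROOFS =====

-- Proof helper: the running-quotient sum Q x t = t + Σ_{e≥1} x // 5^e (used only in the proofs).
def pvQ (x : Int) (t : Int) : Int :=
  if h : 0 < x then
    pvQ (PySem.Int.floordiv x 5) (t + PySem.Int.floordiv x 5)
  else t
termination_by x.toNat
decreasing_by
  rw [PySem.Int.floordiv_eq_ediv_of_pos (by norm_num : (0:Int) < 5)]
  omega

theorem fd_nonneg {x : Int} (hx : 0 ≤ x) {b : Int} (hb : 0 < b) :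
    0 ≤ PySem.Int.floordiv x b := by
  rw [PySem.Int.floordiv_eq_ediv_of_pos hb]
  exact Int.ediv_nonneg hx hb.le

theorem fd_compose (x : Int) (e : Nat) :
    PySem.Int.floordiv (PySem.Int.floordiv x (5 ^ e)) 5 = PySem.Int.floordiv x (5 ^ (e + 1)) := by
  rw [PySem.Int.floordiv_eq_ediv_of_pos (b := (5:Int) ^ e) (by positivity),
      PySem.Int.floordiv_eq_ediv_of_pos (by norm_num : (0:Int) < 5),
      PySem.Int.floordiv_eq_ediv_of_pos (b := (5:Int) ^ (e+1)) (by positivity),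
      pow_succ]
  exact Int.ediv_ediv_of_nonneg (by positivity)

theorem pvQ_zero (t : Int) : pvQ 0 t = t := by
  rw [pvQ]
  simp

-- Invariant: A's state at exponent e+1 equals the quotient-sum loop at running quotient x // 5^e.
theorem key (x : Int) (hx : 0 ≤ x) :
    ∀ (n : Nat) (e : Nat) (t : Int), (PySem.Int.floordiv x (5 ^ e)).toNat = n →
      third_computation_goA x (e + 1) t = pvQ (PySem.Int.floordiv x (5 ^ e)) t := by
  intro n
  induction n using Nat.strong_induction_on with
  | _ n ih =>
    intro e t hn
    set y := PySem.Int.floordiv x (5 ^ e) with hy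
    have hy0 : 0 ≤ y := fd_nonneg hx (by positivity)
    by_cases hpos : 0 < y
    · have hx0 : 0 < x := by
        rcases lt_or_eq_of_le hx with h | h
        · exact h
        · exfalso
          rw [hy, ← h] at hpos
          rw [PySem.Int.floordiv_eq_ediv_of_pos (b := (5:Int) ^ e) (by positivity)] at hpos
          simp at hpos
      have hc : PySem.Int.floordiv x (5 ^ (e + 1)) = PySem.Int.floordiv y 5 := (fd_compose x e).symm
      rw [pvQ, dif_pos hpos]
      by_cases hz : PySem.Int.floordiv y 5 = 0
      · rw [third_computation_goA, dif_neg (by rw [hc, hz]; simp), hz, pvQ_zero]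
        simp
      · rw [third_computation_goA, dif_pos ⟨hx0, by rw [hc]; exact hz⟩, ← hc]
        apply ih ((PySem.Int.floordiv x (5 ^ (e + 1))).toNat) _ (e + 1) _ rfl
        rw [hc, PySem.Int.floordiv_eq_ediv_of_pos (by norm_num : (0:Int) < 5)]
        omega
    · have hy00 : y = 0 := le_antisymm (by omega) hy0
      have hc : PySem.Int.floordiv x (5 ^ (e + 1)) = 0 := by
        rw [← fd_compose x e, ← hy, hy00]
        rw [PySem.Int.floordiv_eq_ediv_of_pos (by norm_num : (0:Int) < 5)]
        simp
      rw [third_computation_goA, dif_neg (by rw [hc]; simp), hy00, pvQ_zero]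

-- Accumulator shifts for both loops.
theorem pvQ_shift (x : Int) : ∀ (n : Nat), x.toNat = n → ∀ t, pvQ x t = t + pvQ x 0 := by
  intro n
  induction n using Nat.strong_induction_on generalizing x with
  | _ n ih =>
    intro hn t
    by_cases hpos : 0 < x
    · have hlt : (PySem.Int.floordiv x 5).toNat < n := by
        rw [PySem.Int.floordiv_eq_ediv_of_pos (by norm_num : (0:Int) < 5)]; omega
      rw [pvQ, dif_pos hpos]
      conv_rhs => rw [pvQ]
      rw [dif_pos hpos,
          ih _ hlt _ rfl (t + PySem.Int.floordiv x 5),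
          ih _ hlt _ rfl (0 + PySem.Int.floordiv x 5)]
      ring
    · rw [pvQ, dif_neg hpos, pvQ, dif_neg hpos]; ring
theorem goS_shift (x : Int) : ∀ (n : Nat), x.toNat = n → ∀ s, third_computation_goS x s = s + third_computation_goS x 0 := by
  intro n
  induction n using Nat.strong_induction_on generalizing x with
  | _ n ih =>
    intro hn s
    by_cases hpos : 0 < x
    · have hlt : (PySem.Int.floordiv x 5).toNat < n := by
        rw [PySem.Int.floordiv_eq_ediv_of_pos (by norm_num : (0:Int) < 5)]; omega
      rw [third_computation_goS, dif_pos hpos]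
      conv_rhs => rw [third_computation_goS]
      rw [dif_pos hpos,
          ih _ hlt _ rfl (s + PySem.Int.mod x 5),
          ih _ hlt _ rfl (0 + PySem.Int.mod x 5)]
      ring
    · rw [third_computation_goS, dif_neg hpos, third_computation_goS, dif_neg hpos]; ring

-- Legendre's identity: 4 * (quotient sum) + (base-5 digit sum) = x, for 0 ≤ x.
theorem legendre (x : Int) (hx : 0 ≤ x) :
    ∀ (n : Nat), x.toNat = n → 4 * pvQ x 0 + third_computation_goS x 0 = x := by
  intro n
  induction n using Nat.strong_induction_on generalizing x with
  | _ n ih =>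
    intro hn
    by_cases hpos : 0 < x
    · have hq0 : 0 ≤ PySem.Int.floordiv x 5 := fd_nonneg hx (by norm_num)
      have hlt : (PySem.Int.floordiv x 5).toNat < n := by
        rw [PySem.Int.floordiv_eq_ediv_of_pos (by norm_num : (0:Int) < 5)]; omega
      have hihyp := ih _ hlt _ hq0 rfl
      have hdm := PySem.Int.floordiv_mul_add_mod x 5
      rw [pvQ, dif_pos hpos, third_computation_goS, dif_pos hpos,
          pvQ_shift _ _ rfl, goS_shift _ _ rfl]
      omega
    · have hx0 : x = 0 := le_antisymm (by omega) hx
      subst hx0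
      rw [pvQ_zero, third_computation_goS]
      simp
      
-- ===== VERDICT (by name: the statement is the Claim_ definition above) =====
theorem third_computation_spec : Claim_equal_third_computation := by
  intro x _ hpre
  unfold Spec_third_computation third_computation third_computation_alt
  have h1 : PySem.Int.floordiv x (5 ^ 0) = x := by
    rw [PySem.Int.floordiv_eq_ediv_of_pos (b := (5:Int) ^ 0) (by norm_num)]
    simp
  have hA : third_computation_goA x 1 0 = pvQ x 0 := by
    have := key x hpre (PySem.Int.floordiv x (5 ^ 0)).toNat 0 0 rfl
    rwa [h1] at this
  have hL := legendre x hpre x.toNat rfl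
  have hsub : x - third_computation_goS x 0 = 4 * pvQ x 0 := by omega
  rw [hA, hsub, PySem.Int.floordiv_eq_ediv_of_pos (by norm_num : (0:Int) < 4)]
  omega
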